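-- pv_equiv track=rewrite | github.com/EthanMik/Engr102_Python_Labs | Unit_6/cobalancing_numbers.py | find_cobalancing_num
-- ===== SOURCE A (Python) =====
-- def integer_sum(min: int, max: int) -> int:
--     n = max - min + 1
--     return n * (max + min) // 2
--
-- def find_cobalancing_num(n: int) -> int:
--     n_sum = integer_sum(1, n)
--     r_sum = 0
--     for r in range(1, n):
--         sum = n + r
--         r_sum += sum
--         if r_sum == n_sum:
--             return r
--     return None
-- ===== SOURCE B (Python) =====
-- def _isqrt(m):
--     # Newton's integer square-root iteration; only ever called with m >= 1.
--     guess = m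
--     nxt = (guess + m // guess) // 2
--     while nxt < guess:
--         guess = nxt
--         nxt = (guess + m // guess) // 2
--     return guess
--
--
-- def find_cobalancing_num(n: int) -> int:
--     # r is a solution iff r*(r+1)/2 + r*n = n*(n+1)/2 with 1 <= r <= n-1,
--     # i.e. r = (sqrt(8*n*n + 8*n + 1) - (2*n + 1)) / 2 for a perfect-square discriminant.
--     if n < 2:
--         return None
--     d = 8 * n * n + 8 * n + 1
--     s = _isqrt(d)
--     if s * s != d:
--         return None
--     r = (s - (2 * n + 1)) // 2
--     if 1 <= r <= n - 1 and 2 * r * n + r * (r + 1) == n * (n + 1):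
--         return r
--     return None
-- ===== Notes on version B (the rewrite author's own statement) =====
-- stated objective: faster
-- what changed: replaces the linear cumulative-sum scan over range(1,n) by solving the quadratic r^2+(2n+1)r-n(n+1)=0 in closed form with a Newton integer square root and verifying the root lies in [1,n-1]
import Mathlib
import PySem

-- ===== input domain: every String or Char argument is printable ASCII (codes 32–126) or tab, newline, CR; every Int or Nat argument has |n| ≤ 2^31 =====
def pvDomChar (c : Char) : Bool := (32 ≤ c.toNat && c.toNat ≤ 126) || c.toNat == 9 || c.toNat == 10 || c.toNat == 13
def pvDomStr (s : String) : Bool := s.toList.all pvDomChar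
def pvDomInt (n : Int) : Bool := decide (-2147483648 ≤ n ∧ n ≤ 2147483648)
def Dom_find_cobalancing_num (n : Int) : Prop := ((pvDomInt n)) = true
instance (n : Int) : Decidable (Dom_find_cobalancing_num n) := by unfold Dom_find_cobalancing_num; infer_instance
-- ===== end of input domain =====

-- B replaces A's linear cumulative-sum scan by the closed-form quadratic root (Newton integer
-- sqrt + verification); equivalence of return values is proved for all n (both are total).

-- ===== PORT A =====
def integer_sum (mn mx : Int) : Int :=
  let n := mx - mn + 1
  PySem.Int.floordiv (n * (mx + mn)) 2

def pvLoopA (n n_sum : Int) : List Int → Int → Option Int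
  | [], _ => none
  | r :: rest, r_sum =>
      let sum := n + r
      let r_sum' := r_sum + sum
      if r_sum' = n_sum then some r else pvLoopA n n_sum rest r_sum'

def find_cobalancing_num (n : Int) : Option Int :=
  let n_sum := integer_sum 1 n
  pvLoopA n n_sum (PySem.List.pyRange 1 n 1) 0

-- ===== PORT B =====
-- Source B's _isqrt (Newton iteration); it is only ever called with m = 8n²+8n+1 ≥ 1, where
-- Python's int arithmetic (// on nonnegative values) coincides with Nat arithmetic, so the
-- port runs on Nat.  The while loop becomes the obvious recursion on the decreasing guess.
def pvIsqrt (m : Nat) (guess : Nat) : Nat :=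
  let nxt := (guess + m / guess) / 2
  if _h : nxt < guess then pvIsqrt m nxt else guess
termination_by guess

def find_cobalancing_num_alt (n : Int) : Option Int :=
  if n < 2 then none
  else
    let d : Int := 8 * n * n + 8 * n + 1
    let s : Int := (pvIsqrt d.toNat d.toNat : Nat)
    if s * s ≠ d then none
    else
      let r := PySem.Int.floordiv (s - (2 * n + 1)) 2
      if 1 ≤ r ∧ r ≤ n - 1 ∧ 2 * r * n + r * (r + 1) = n * (n + 1) then some r
      else none

-- ===== PRECONDITION & SPEC =====
def Spec_find_cobalancing_num (n : Int) (out : Option Int) : Prop := out = find_cobalancing_num_alt n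
instance (n : Int) (out : Option Int) : Decidable (Spec_find_cobalancing_num n out) := by unfold Spec_find_cobalancing_num; infer_instance

-- ===== CLAIM (what is proved, stated in full; the proofs are below) =====
def Claim_equal_find_cobalancing_num : Prop := ∀ (n : Int), Dom_find_cobalancing_num n → Spec_find_cobalancing_num n (find_cobalancing_num n)

-- ===== LEMMAS AND PROOFS =====

theorem two_integer_sum (n : Int) : 2 * integer_sum 1 n = n * (n + 1) := by
  obtain ⟨k, hk⟩ := Int.even_mul_succ_self n
  unfold integer_sum
  rw [PySem.Int.floordiv_eq_ediv_of_pos (by norm_num)]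
  have h : (n - 1 + 1) * (n + 1) = 2 * k := by linarith [hk]
  rw [h, Int.mul_ediv_cancel_left _ (by norm_num)]
  linarith

theorem loop_none (n T : Int) (hT : 2 * T = n * (n + 1)) :
    ∀ (k : Nat) (a s : Int), (n - a).toNat = k → 1 ≤ a →
    2 * s = 2 * (a - 1) * n + (a - 1) * a →
    (∀ r : Int, a ≤ r → r ≤ n - 1 → 2 * r * n + r * (r + 1) ≠ n * (n + 1)) →
    pvLoopA n T (PySem.List.pyRange a n 1) s = none := by
  intro k
  induction k with
  | zero =>
    intro a s hk _ _ _
    rw [PySem.List.pyRange_one_eq_nil (by omega)]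
    rfl
  | succ k ih =>
    intro a s hk ha hs hnone
    have hlt : a < n := by omega
    rw [PySem.List.pyRange_one_cons hlt]
    show (if s + (n + a) = T then some a else pvLoopA n T (PySem.List.pyRange (a+1) n 1) (s + (n + a))) = none
    have hne : s + (n + a) ≠ T := by
      intro he
      exact hnone a le_rfl (by omega) (by linarith)
    rw [if_neg hne]
    exact ih (a + 1) (s + (n + a)) (by omega) (by omega) (by ring_nf; linarith)
      (fun r h1 h2 => hnone r (by omega) h2)

theorem loop_hit (n T : Int) (hT : 2 * T = n * (n + 1)) (r0 : Int)
    (hr1 : 1 ≤ r0) (hr2 : r0 ≤ n - 1)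
    (hr3 : 2 * r0 * n + r0 * (r0 + 1) = n * (n + 1)) :
    ∀ (k : Nat) (a s : Int), (n - a).toNat = k → 1 ≤ a → a ≤ r0 →
    2 * s = 2 * (a - 1) * n + (a - 1) * a →
    pvLoopA n T (PySem.List.pyRange a n 1) s = some r0 := by
  intro k
  induction k with
  | zero => intro a s hk _ har _; omega
  | succ k ih =>
    intro a s hk ha har hs
    have hlt : a < n := by omega
    rw [PySem.List.pyRange_one_cons hlt]
    show (if s + (n + a) = T then some a else pvLoopA n T (PySem.List.pyRange (a+1) n 1) (s + (n + a))) = some r0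
    rcases eq_or_lt_of_le har with heq | hltr
    · subst heq
      have : s + (n + a) = T := by linarith
      rw [if_pos this]
    · have hne : s + (n + a) ≠ T := by
        intro he
        have h2s : 2 * a * n + a * (a + 1) = n * (n + 1) := by linarith
        nlinarith [h2s, hr3, hltr, ha, hlt]
      rw [if_neg hne]
      exact ih (a + 1) (s + (n + a)) (by omega) (by omega) (by omega) (by ring_nf; linarith)

theorem pvIsqrt_eq_iter (m g : Nat) : pvIsqrt m g = Nat.sqrt.iter m g := by
  unfold pvIsqrt
  rw [Nat.sqrt.iter]
  simp only []
  split
  · rw [pvIsqrt_eq_iter]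
  · rfl
termination_by g

theorem pvIsqrt_sq (K : Nat) : pvIsqrt (K * K) (K * K) = K := by
  rw [pvIsqrt_eq_iter]
  have h1 := Nat.sqrt.iter_sq_le (K * K) (K * K)
  have h2 := Nat.sqrt.lt_iter_succ_sq (K * K) (K * K) (by nlinarith)
  set i := Nat.sqrt.iter (K * K) (K * K) with hi
  nlinarith [h1, h2]

theorem A_eq (n : Int) (_hn : 2 ≤ n) (r0 : Int) (h1 : 1 ≤ r0) (h2 : r0 ≤ n - 1)
    (h3 : 2 * r0 * n + r0 * (r0 + 1) = n * (n + 1)) :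
    find_cobalancing_num n = some r0 := by
  unfold find_cobalancing_num
  exact loop_hit n (integer_sum 1 n) (two_integer_sum n) r0 h1 h2 h3
    (n - 1).toNat 1 0 (by omega) le_rfl h1 (by ring)

theorem B_eq (n : Int) (_hn : 2 ≤ n) (r0 : Int) (h1 : 1 ≤ r0) (h2 : r0 ≤ n - 1)
    (h3 : 2 * r0 * n + r0 * (r0 + 1) = n * (n + 1)) :
    find_cobalancing_num_alt n = some r0 := by
  have hk0 : (0:Int) ≤ 2 * n + 2 * r0 + 1 := by omega
  have hK : ((2 * n + 2 * r0 + 1 : Int).toNat : Int) = 2 * n + 2 * r0 + 1 :=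
    Int.toNat_of_nonneg hk0
  have hd : (8 * n * n + 8 * n + 1 : Int)
      = (((2 * n + 2 * r0 + 1 : Int).toNat * (2 * n + 2 * r0 + 1 : Int).toNat : Nat) : Int) := by
    rw [Int.natCast_mul, hK]; nlinarith [h3]
  have hdt : (8 * n * n + 8 * n + 1 : Int).toNat
      = (2 * n + 2 * r0 + 1 : Int).toNat * (2 * n + 2 * r0 + 1 : Int).toNat := by
    rw [hd, Int.toNat_natCast]
  have hs : ((pvIsqrt (8 * n * n + 8 * n + 1 : Int).toNat (8 * n * n + 8 * n + 1 : Int).toNat : Nat) : Int)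
      = 2 * n + 2 * r0 + 1 := by
    rw [hdt, pvIsqrt_sq, hK]
  have hsq : (8 * n * n + 8 * n + 1 : Int) = (2 * n + 2 * r0 + 1) * (2 * n + 2 * r0 + 1) := by
    nlinarith [h3]
  have hr : PySem.Int.floordiv (2 * n + 2 * r0 + 1 - (2 * n + 1)) 2 = r0 := by
    have h2r : (2 * n + 2 * r0 + 1 - (2 * n + 1) : Int) = 2 * r0 := by ring
    rw [h2r, PySem.Int.floordiv_eq_ediv_of_pos (by norm_num),
      Int.mul_ediv_cancel_left _ (by norm_num)]
  simp only [find_cobalancing_num_alt]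
  rw [if_neg (by omega), hs, if_neg (by rw [hsq]; simp), hr, if_pos ⟨h1, h2, h3⟩]

theorem B_none (n : Int) (hn : 2 ≤ n)
    (hex : ∀ r0 : Int, 1 ≤ r0 → r0 ≤ n - 1 → 2 * r0 * n + r0 * (r0 + 1) ≠ n * (n + 1)) :
    find_cobalancing_num_alt n = none := by
  simp only [find_cobalancing_num_alt]
  rw [if_neg (by omega)]
  by_cases hsq : ((pvIsqrt (8 * n * n + 8 * n + 1 : Int).toNat (8 * n * n + 8 * n + 1 : Int).toNat : Nat) : Int) *
      ((pvIsqrt (8 * n * n + 8 * n + 1 : Int).toNat (8 * n * n + 8 * n + 1 : Int).toNat : Nat) : Int)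
      ≠ 8 * n * n + 8 * n + 1
  · rw [if_pos hsq]
  · rw [if_neg hsq, if_neg]
    rintro ⟨hc1, hc2, hc3⟩
    exact hex _ hc1 hc2 hc3

-- ===== VERDICT (by name: the statement is the Claim_ definition above) =====
theorem find_cobalancing_num_spec : Claim_equal_find_cobalancing_num := by
  intro n _
  show find_cobalancing_num n = find_cobalancing_num_alt n
  by_cases hn : n < 2
  · unfold find_cobalancing_num find_cobalancing_num_alt
    rw [PySem.List.pyRange_one_eq_nil (by omega), if_pos hn]
    rfl
  · push Not at hn
    by_cases hex : ∃ r0 : Int, 1 ≤ r0 ∧ r0 ≤ n - 1 ∧ 2 * r0 * n + r0 * (r0 + 1) = n * (n + 1)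
    · obtain ⟨r0, h1, h2, h3⟩ := hex
      rw [A_eq n hn r0 h1 h2 h3, B_eq n hn r0 h1 h2 h3]
    · push Not at hex
      rw [B_none n hn hex]
      unfold find_cobalancing_num
      exact loop_none n (integer_sum 1 n) (two_integer_sum n) (n - 1).toNat 1 0
        (by omega) le_rfl (by ring) (fun r ha hb => hex r ha hb)
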